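-- pv_equiv track=rewrite | github.com/amol179/DSA_Notes_Dump | USACO/Code_Force/1000/D. Black and White Stripe/D. Black and White Stripe.py | min_recolorings
-- ===== SOURCE A (Python) =====
-- def min_recolorings(t, test_cases):
--     results = []
--     for case in test_cases:
--         n, k, s = case
--         # Calculate the number of 'W' in the first window of size k
--         current_white_count = s[:k].count("W")
--         min_white_count = current_white_count
--
--         # Slide the window across the string
--         for i in range(1, n - k + 1):
--             # Remove the first character of the previous window and add the new character
--             if s[i - 1] == "W":
--                 current_white_count -= 1
--             if s[i + k - 1] == "W":
--                 current_white_count += 1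
--
--             # Update the minimum white count
--             min_white_count = min(min_white_count, current_white_count)
--
--         results.append(min_white_count)
--
--     return results
-- ===== SOURCE B (Python) =====
-- def min_recolorings(t, test_cases):
--     results = []
--     for n, k, s in test_cases:
--         # prefix[j] = number of 'W' among the first j characters
--         prefix = [0]
--         for c in s:
--             prefix.append(prefix[-1] + (1 if c == "W" else 0))
--         best = s[:k].count("W")
--         for i in range(1, n - k + 1):
--             best = min(best, prefix[i + k] - prefix[i])
--         results.append(best)
--     return results
-- ===== Notes on version B (the rewrite author's own statement) =====
-- stated objective: alternative
-- what changed: Replaces A's incremental sliding-window maintenance (decrement/increment per shift) with a precomputed prefix-count table: each window's white count is a table difference prefix[i+k]-prefix[i]; Pre_ excludes cases where A raises IndexError (window slide past the string) and cases with negative k and a nonempty slide loop, where A's value comes from Python's negative-index wraparound (an accident of A's indexing) and B's prefix table naturally indexes differently.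
-- outside the precondition, e.g. on min_recolorings(1, [(0, -1, 'W')]): A returns [0], B returns [-1]
import Mathlib
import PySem

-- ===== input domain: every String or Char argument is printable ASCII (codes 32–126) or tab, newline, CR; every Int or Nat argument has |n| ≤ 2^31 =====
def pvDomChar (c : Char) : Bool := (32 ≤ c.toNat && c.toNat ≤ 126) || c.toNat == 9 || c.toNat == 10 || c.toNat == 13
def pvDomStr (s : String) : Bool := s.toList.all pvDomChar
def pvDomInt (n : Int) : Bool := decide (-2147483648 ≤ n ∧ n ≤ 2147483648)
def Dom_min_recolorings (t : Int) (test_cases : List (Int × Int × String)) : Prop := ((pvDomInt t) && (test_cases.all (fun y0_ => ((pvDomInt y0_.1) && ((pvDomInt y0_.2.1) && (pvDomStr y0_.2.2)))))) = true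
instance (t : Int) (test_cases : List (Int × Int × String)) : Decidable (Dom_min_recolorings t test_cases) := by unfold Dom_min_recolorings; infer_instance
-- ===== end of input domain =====

-- B replaces A's incremental sliding-window count with a prefix-count table (alternative
-- decomposition, similar cost); equivalence is about the return value only.

-- ===== PORT A =====
-- one test case of A: seed count on s[:k], then slide the window incrementally
def pvA_case (case : Int × Int × String) : Int :=
  let n := case.1
  let k := case.2.1
  let s := case.2.2
  let cur0 : Int := (PySem.Str.count (PySem.Str.slice s none (some k)) "W" : Int)
  -- inside Pre_ every s[i-1] / s[i+k-1] is in range; none (= IndexError) is excluded by Pre_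
  let st := (PySem.List.pyRange 1 (n - k + 1) 1).foldl
    (fun (p : Int × Int) i =>
      let c1 := if PySem.Str.pyGet? s (i - 1) = some 'W' then p.1 - 1 else p.1
      let c2 := if PySem.Str.pyGet? s (i + k - 1) = some 'W' then c1 + 1 else c1
      (c2, min p.2 c2)) (cur0, cur0)
  st.2

def min_recolorings (t : Int) (test_cases : List (Int × Int × String)) : List Int :=
  test_cases.foldl (fun results case => results ++ [pvA_case case]) []

-- ===== PORT B =====
-- one test case of B: prefix-count table, window counts as table differences
def pvB_case (case : Int × Int × String) : Int :=
  let n := case.1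
  let k := case.2.1
  let s := case.2.2
  let pfx : List Int := s.toList.foldl
    (fun P c => P ++ [PySem.List.pyGetD P (-1) 0 + (if c = 'W' then 1 else 0)]) [0]
  let best : Int := (PySem.Str.count (PySem.Str.slice s none (some k)) "W" : Int)
  -- inside Pre_ every pfx[i+k] / pfx[i] is in range; none (= IndexError) is excluded by Pre_
  (PySem.List.pyRange 1 (n - k + 1) 1).foldl
    (fun best i =>
      min best (PySem.List.pyGetD pfx (i + k) 0 - PySem.List.pyGetD pfx i 0)) best

def min_recolorings_alt (t : Int) (test_cases : List (Int × Int × String)) : List Int :=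
  test_cases.foldl (fun results case => results ++ [pvB_case case]) []

-- ===== PRECONDITION & SPEC =====
-- Pre_ excludes, per case, (a) inputs where A raises IndexError (the slide loop reading past
-- the end of s, i.e. the slide loop is nonempty and n > len(s)), and (b) inputs with k < 0
-- and a nonempty slide loop, where A returns a value produced by Python's negative-index
-- wraparound on s[i+k-1] — an accident of A's indexing with no counterpart in B's prefix
-- table (B's own negative list indices wrap differently there).  Kept: every case with an
-- empty slide loop (n ≤ k), and every well-formed case (0 ≤ k and n ≤ len(s)).
def Pre_min_recolorings (t : Int) (test_cases : List (Int × Int × String)) : Prop :=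
  ∀ case ∈ test_cases,
    case.1 ≤ case.2.1 ∨ (0 ≤ case.2.1 ∧ case.1 ≤ (case.2.2.toList.length : Int))
instance (t : Int) (test_cases : List (Int × Int × String)) : Decidable (Pre_min_recolorings t test_cases) := by unfold Pre_min_recolorings; infer_instance

def pvWitness_min_recolorings : Int × (List (Int × Int × String)) := (1, [(3, 1, "WBW")])

def Spec_min_recolorings (t : Int) (test_cases : List (Int × Int × String)) (out : List Int) : Prop := out = min_recolorings_alt t test_cases
instance (t : Int) (test_cases : List (Int × Int × String)) (out : List Int) : Decidable (Spec_min_recolorings t test_cases out) := by unfold Spec_min_recolorings; infer_instance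

-- ===== CLAIM (what is proved, stated in full; the proofs are below) =====
def Claim_equal_min_recolorings : Prop := ∀ (t : Int) (test_cases : List (Int × Int × String)), Dom_min_recolorings t test_cases → Pre_min_recolorings t test_cases → Spec_min_recolorings t test_cases (min_recolorings t test_cases)

-- ===== LEMMAS AND PROOFS =====

def pvPW (cs : List Char) (m : Nat) : Int := ((cs.take m).count 'W' : Int)

def pvF (cs : List Char) (K j : Nat) : Int := pvPW cs (j + K) - pvPW cs j

theorem pvCount_go_singleton (c : Char) (l : List Char) : ∀ (fuel acc : Nat),
    l.length ≤ fuel → PySem.Chars.count.go [c] fuel l acc = acc + l.count c := by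
  induction l with
  | nil => intro fuel acc _; cases fuel <;> simp [PySem.Chars.count.go]
  | cons h t ih =>
      intro fuel acc hf
      cases fuel with
      | zero => simp at hf
      | succ m =>
        rw [PySem.Chars.count.go]
        by_cases hc : h = c
        · subst hc
          simp [List.isPrefixOf, ih m (acc + 1) (by simpa using hf)]
          ring
        · simp [List.isPrefixOf, hc, ih m acc (by simpa using hf), Ne.symm hc]

theorem pvCount_singleton (cs : List Char) (c : Char) :
    PySem.Chars.count cs [c] = cs.count c := by
  simp [PySem.Chars.count, pvCount_go_singleton c cs cs.length 0 le_rfl]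

theorem pvPfx_eq (cs : List Char) :
    cs.foldl (fun P c => P ++ [PySem.List.pyGetD P (-1) 0 + (if c = 'W' then 1 else 0)]) [0]
      = (List.range (cs.length + 1)).map (fun j => pvPW cs j) := by
  induction cs using List.reverseRecOn with
  | nil => simp [pvPW]
  | append_singleton cs c ih =>
      rw [List.foldl_append, ih]
      simp only [List.foldl_cons, List.foldl_nil]
      have hlen : (cs ++ [c]).length + 1 = (cs.length + 1) + 1 := by simp
      conv_rhs => rw [hlen, List.range_succ, List.map_append]
      congr 1
      · apply List.map_congr_left
        intro j hj
        simp only [List.mem_range] at hj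
        have : (cs ++ [c]).take j = cs.take j := by
          rw [List.take_append_of_le_length (by omega)]
        simp [pvPW, this]
      · rw [List.range_succ (n := cs.length), List.map_append]
        simp only [List.map_cons, List.map_nil]
        rw [PySem.List.pyGetD_neg_one_append_singleton]
        have h1 : (cs ++ [c]).take (cs.length + 1) = cs ++ [c] := by
          apply List.take_of_length_le; simp
        have h2 : cs.take cs.length = cs := List.take_of_length_le le_rfl
        simp [pvPW, h1, h2, List.count_append, List.count_singleton]

theorem pvSeed_eq (cs : List Char) (k : Int) :
    ((PySem.Chars.count (PySem.List.slice cs none (some k)) ['W'] : Nat) : Int)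
      = pvPW cs (PySem.List.clampIdx cs.length k) := by
  have hs : PySem.List.slice cs none (some k) = cs.take (PySem.List.clampIdx cs.length k) := rfl
  rw [hs, pvCount_singleton, pvPW]

theorem pvPW_succ (cs : List Char) (m : Nat) (h : m < cs.length) :
    pvPW cs (m + 1) = pvPW cs m + (if cs.getD m 'B' = 'W' then 1 else 0) := by
  have hg : cs[m]? = some cs[m] := List.getElem?_eq_getElem h
  rw [pvPW, pvPW, List.take_succ, hg, List.getD, hg]
  simp only [Option.toList_some, List.count_append, List.count_singleton]
  by_cases hc : cs[m] = 'W' <;> simp [hc]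

theorem pvPW_zero (cs : List Char) : pvPW cs 0 = 0 := by simp [pvPW]

theorem pvLoopA (s : String) (K : Nat) :
    ∀ (M : Nat), K + M ≤ s.toList.length →
    (List.range M).foldl
      (fun (p : Int × Int) (j : Nat) =>
        let i : Int := 1 + (j : Int)
        let c1 := if PySem.Str.pyGet? s (i - 1) = some 'W' then p.1 - 1 else p.1
        let c2 := if PySem.Str.pyGet? s (i + (K : Int) - 1) = some 'W' then c1 + 1 else c1
        (c2, min p.2 c2))
      (pvF s.toList K 0, pvF s.toList K 0)
    = (pvF s.toList K M,
       (List.range M).foldl (fun acc j => min acc (pvF s.toList K (j + 1))) (pvF s.toList K 0)) := by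
  intro M
  induction M with
  | zero => intro _; simp
  | succ M ih =>
      intro hM
      rw [List.range_succ, List.foldl_append, List.foldl_append, ih (by omega)]
      simp only [List.foldl_cons, List.foldl_nil]
      have h1 : (1 : Int) + (M : Int) - 1 = ((M : Nat) : Int) := by push_cast; ring
      have h2 : (1 : Int) + (M : Int) + (K : Int) - 1 = ((M + K : Nat) : Int) := by push_cast; ring
      rw [h1, h2]
      have hMl : M < s.toList.length := by omega
      have hMKl : M + K < s.toList.length := by omega
      have g1 : PySem.Str.pyGet? s ((M : Nat) : Int) = some s.toList[M] := by
        rw [PySem.Str.pyGet?_natCast]; exact List.getElem?_eq_getElem hMl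
      have g2 : PySem.Str.pyGet? s ((M + K : Nat) : Int) = some s.toList[M + K] := by
        rw [PySem.Str.pyGet?_natCast]; exact List.getElem?_eq_getElem hMKl
      have e1 : pvPW s.toList (M + 1) = pvPW s.toList M + (if s.toList[M] = 'W' then 1 else 0) := by
        have := pvPW_succ s.toList M hMl
        rwa [List.getD, List.getElem?_eq_getElem hMl] at this
      have e2 : pvPW s.toList (M + 1 + K) = pvPW s.toList (M + K) + (if s.toList[M + K] = 'W' then 1 else 0) := by
        have := pvPW_succ s.toList (M + K) hMKl
        rwa [List.getD, List.getElem?_eq_getElem hMKl, Nat.add_right_comm] at this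
      rw [g1, g2]
      simp only [Prod.mk.injEq]
      constructor
      · simp only [pvF] at *
        by_cases hc1 : s.toList[M] = 'W' <;> by_cases hc2 : s.toList[M + K] = 'W' <;>
          simp [hc1, hc2] at e1 e2 ⊢ <;> omega
      · simp only [pvF] at *
        by_cases hc1 : s.toList[M] = 'W' <;> by_cases hc2 : s.toList[M + K] = 'W' <;>
          simp [hc1, hc2] at e1 e2 ⊢ <;>
          (congr 1 <;> omega)

theorem pvLoopA' (s : String) (K M : Nat) (h : K + M ≤ s.toList.length) :
    ((List.range M).map (fun j : Nat => 1 + (j : Int))).foldl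
      (fun (p : Int × Int) (i : Int) =>
        let c1 := if PySem.Str.pyGet? s (i - 1) = some 'W' then p.1 - 1 else p.1
        let c2 := if PySem.Str.pyGet? s (i + (K : Int) - 1) = some 'W' then c1 + 1 else c1
        (c2, min p.2 c2))
      (pvF s.toList K 0, pvF s.toList K 0)
    = (pvF s.toList K M,
       (List.range M).foldl (fun acc j => min acc (pvF s.toList K (j + 1))) (pvF s.toList K 0)) := by
  rw [List.foldl_map]
  exact pvLoopA s K M h

theorem pvLoopB (cs : List Char) (K N : Nat) (h : K + N ≤ cs.length) (b0 : Int) :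
    ((List.range N).map (fun j : Nat => 1 + (j : Int))).foldl
      (fun (best : Int) (i : Int) =>
        min best (PySem.List.pyGetD ((List.range (cs.length + 1)).map (fun j => pvPW cs j)) (i + (K : Int)) 0
               - PySem.List.pyGetD ((List.range (cs.length + 1)).map (fun j => pvPW cs j)) i 0)) b0
    = (List.range N).foldl (fun acc j => min acc (pvF cs K (j + 1))) b0 := by
  rw [List.foldl_map]
  apply PySem.List.foldl_congr_mem
  intro acc j hj
  simp only [List.mem_range] at hj
  have hj1 : (1 : Int) + (j : Int) + (K : Int) = ((j + 1 + K : Nat) : Int) := by push_cast; ring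
  have hj2 : (1 : Int) + (j : Int) = ((j + 1 : Nat) : Int) := by push_cast; ring
  have e1 : PySem.List.pyGetD ((List.range (cs.length + 1)).map (fun j => pvPW cs j)) (1 + (j : Int) + (K : Int)) 0
      = pvPW cs (j + 1 + K) := by
    rw [hj1, PySem.List.pyGetD_natCast, PySem.List.getD_map_range _ _ _ _ (by omega)]
  have e2 : PySem.List.pyGetD ((List.range (cs.length + 1)).map (fun j => pvPW cs j)) (1 + (j : Int)) 0
      = pvPW cs (j + 1) := by
    rw [hj2, PySem.List.pyGetD_natCast, PySem.List.getD_map_range _ _ _ _ (by omega)]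
  rw [e1, e2]
  have hw : pvPW cs (j + 1 + K) - pvPW cs (j + 1) = pvF cs K (j + 1) := by
    simp [pvF, Nat.add_right_comm]
  rw [hw]

theorem pvCase_eq (case : Int × Int × String)
    (h : case.1 ≤ case.2.1 ∨ (0 ≤ case.2.1 ∧ case.1 ≤ (case.2.2.toList.length : Int))) :
    pvA_case case = pvB_case case := by
  obtain ⟨n, k, s⟩ := case
  simp only at h
  simp only [pvA_case, pvB_case]
  by_cases hloop : n - k + 1 ≤ 1
  · rw [PySem.List.pyRange_one_eq_nil (by omega)]
    simp
  · have hk0 : 0 ≤ k := by rcases h with h | h <;> omega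
    obtain ⟨K, rfl⟩ : ∃ K : Nat, k = (K : Int) := ⟨k.toNat, by omega⟩
    have hnl : n ≤ (s.toList.length : Int) := by rcases h with h | h <;> omega
    have hseed : ((PySem.Str.count (PySem.Str.slice s none (some (K : Int))) "W" : Nat) : Int)
        = pvPW s.toList (PySem.List.clampIdx s.toList.length (K : Int)) := by
      rw [PySem.Str.count_eq]
      have hW : ("W" : String).toList = ['W'] := rfl
      have hs2 : (PySem.Str.slice s none (some (K : Int))).toList = PySem.List.slice s.toList none (some (K : Int)) := by
        simp
      rw [hW, hs2, ← PySem.Chars.slice_eq_listSlice, PySem.Chars.slice_eq_listSlice]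
      exact pvSeed_eq s.toList (K : Int)
    have hclamp : PySem.List.clampIdx s.toList.length (K : Int) = K := by
      simp only [PySem.List.clampIdx]
      split_ifs <;> omega
    have hpfx := pvPfx_eq s.toList
    have hrange : PySem.List.pyRange 1 (n - (K : Int) + 1) 1
        = (List.range (n - (K : Int)).toNat).map (fun j : Nat => 1 + (j : Int)) := by
      rw [PySem.List.pyRange_one]
      have : (n - (K : Int) + 1 - 1).toNat = (n - (K : Int)).toNat := by omega
      rw [this]
    have hKN : K + (n - (K : Int)).toNat ≤ s.toList.length := by omega
    rw [hpfx, hrange, hseed, hclamp]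
    have hS : pvPW s.toList K = pvF s.toList K 0 := by simp [pvF, pvPW_zero]
    rw [hS]
    rw [pvLoopA' s K (n - (K : Int)).toNat hKN]
    rw [pvLoopB s.toList K (n - (K : Int)).toNat hKN]

-- ===== VERDICT (by name: the statement is the Claim_ definition above) =====
theorem min_recolorings_spec : Claim_equal_min_recolorings := by
  intro t test_cases _hdom hpre
  clear _hdom
  unfold Spec_min_recolorings min_recolorings min_recolorings_alt
  induction test_cases using List.reverseRecOn with
  | nil => rfl
  | append_singleton cs c ih =>
      rw [List.foldl_append, List.foldl_append,
        ih (fun x hx => hpre x (List.mem_append_left _ hx))]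
      simp only [List.foldl_cons, List.foldl_nil]
      rw [pvCase_eq c (hpre c (by simp))]
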